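-- pv_equiv track=rewrite | github.com/ajpotts/randomized-optimization | main/randomized_optimization.py | prob3_max
-- ===== SOURCE A (Python) =====
-- def prob3_max(state, k=6, m=3, r=1):
--
--     # Initialize counter
--     fitness_cnt = 0
--
--     # For all pairs of queens
--     for i in range(len(state) - 1):
--
--         sum = 0
--
--         for j in range(0, k):
--             if(i > j):
--                 sum += state[i - j]
--
--         if(sum % m == r):
--
--             fitness_cnt += 1
--
--     return fitness_cnt
-- ===== SOURCE B (Python) =====
-- def prob3_max(state, k=6, m=3, r=1):
--     # Sliding window: maintain the window sum incrementally (O(n) instead of O(n*k)).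
--     kk = k if k > 0 else 0
--     cnt = 0
--     s = 0
--     for i in range(len(state) - 1):
--         if i >= 1:
--             s += state[i]
--             if i - kk >= 1:
--                 s -= state[i - kk]
--         if s % m == r:
--             cnt += 1
--     return cnt
-- ===== Notes on version B (the rewrite author's own statement) =====
-- stated objective: faster
-- what changed: Replaces A's inner loop that recomputes each position's window sum from scratch (O(n*k)) by a single pass that maintains the sliding-window sum incrementally, adding the entering element and subtracting the leaving one.
import Mathlib
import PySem

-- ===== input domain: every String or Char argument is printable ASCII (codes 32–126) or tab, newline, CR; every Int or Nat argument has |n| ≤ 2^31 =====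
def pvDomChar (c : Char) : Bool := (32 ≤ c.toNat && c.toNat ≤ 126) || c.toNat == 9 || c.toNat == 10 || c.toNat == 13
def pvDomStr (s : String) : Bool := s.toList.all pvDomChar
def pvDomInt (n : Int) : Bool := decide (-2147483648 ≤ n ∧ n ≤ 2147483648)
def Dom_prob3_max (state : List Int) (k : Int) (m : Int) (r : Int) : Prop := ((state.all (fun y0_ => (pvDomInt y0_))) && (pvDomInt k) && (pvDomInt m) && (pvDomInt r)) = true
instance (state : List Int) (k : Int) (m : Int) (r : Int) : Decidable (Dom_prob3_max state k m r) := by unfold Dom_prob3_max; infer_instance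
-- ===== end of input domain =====

-- B replaces A's O(n*k) recomputation of each window sum by an O(n) incrementally
-- maintained sliding-window sum (add the entering element, subtract the leaving one).

-- ===== PORT A =====
-- Literal port of A. The index i - j is always in [1, len-2] when the guard i > j
-- holds inside the loop bounds, so the .getD 0 default is never used (exact).
def prob3_max (state : List Int) (k : Int) (m : Int) (r : Int) : Int :=
  (PySem.List.pyRange 0 (PySem.List.len state - 1) 1).foldl
    (fun fitness_cnt i =>
      let sum : Int :=
        (PySem.List.pyRange 0 k 1).foldl
          (fun sum j =>
            if i > j then sum + ((PySem.List.pyGet? state (i - j)).getD 0) else sum) 0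
      if PySem.Int.mod sum m = r then fitness_cnt + 1 else fitness_cnt) 0

-- ===== PORT B =====
-- Literal port of Source B: one pass, running window sum s, counter in the pair's first
-- component. Indices i and i - kk are in range whenever accessed (exact), as in A.
def prob3_max_alt (state : List Int) (k : Int) (m : Int) (r : Int) : Int :=
  let kk : Int := if k > 0 then k else 0
  ((PySem.List.pyRange 0 (PySem.List.len state - 1) 1).foldl
    (fun (cs : Int × Int) i =>
      let s : Int :=
        if 1 ≤ i then
          cs.2 + (PySem.List.pyGet? state i).getD 0 -
            (if 1 ≤ i - kk then (PySem.List.pyGet? state (i - kk)).getD 0 else 0)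
        else cs.2
      (if PySem.Int.mod s m = r then cs.1 + 1 else cs.1, s)) ((0 : Int), (0 : Int))).1

-- ===== PRECONDITION & SPEC =====
-- Pre_ excludes only m = 0, where Python's `sum % m` raises ZeroDivisionError.
def Pre_prob3_max (state : List Int) (k : Int) (m : Int) (r : Int) : Prop := m ≠ 0
instance (state : List Int) (k : Int) (m : Int) (r : Int) : Decidable (Pre_prob3_max state k m r) := by unfold Pre_prob3_max; infer_instance
def pvWitness_prob3_max : List Int × Int × Int × Int := ([1, 2, 3, 4, 5], 3, 3, 1)

def Spec_prob3_max (state : List Int) (k : Int) (m : Int) (r : Int) (out : Int) : Prop := out = prob3_max_alt state k m r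
instance (state : List Int) (k : Int) (m : Int) (r : Int) (out : Int) : Decidable (Spec_prob3_max state k m r out) := by unfold Spec_prob3_max; infer_instance

-- ===== CLAIM (what is proved, stated in full; the proofs are below) =====
def Claim_equal_prob3_max : Prop := ∀ (state : List Int) (k : Int) (m : Int) (r : Int), Dom_prob3_max state k m r → Pre_prob3_max state k m r → Spec_prob3_max state k m r (prob3_max state k m r)

-- ===== LEMMAS AND PROOFS =====

-- Window sum ending at index i: the last min(kt, i) elements state[i], …, state[i-min(kt,i)+1].
def pvW (state : List Int) (kt : Nat) (i : Nat) : Int :=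
  ∑ j ∈ Finset.range (min kt i), state.getD (i - j) 0

lemma pvW_zero (state : List Int) (kt : Nat) : pvW state kt 0 = 0 := by
  simp [pvW]

lemma innerA_aux (state : List Int) (i : Nat) : ∀ n : Nat,
    (List.range n).foldl
      (fun (s : Int) (t : Nat) => if (i : Int) > (t : Int) then s + ((PySem.List.pyGet? state ((i : Int) - (t : Int))).getD 0) else s) 0
    = ∑ j ∈ Finset.range (min n i), state.getD (i - j) 0 := by
  intro n
  induction n with
  | zero => simp
  | succ n ih =>
    rw [List.range_succ, List.foldl_append, ih]
    by_cases h : n < i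
    · have h1 : (i : Int) > (n : Int) := by exact_mod_cast h
      have h2 : (i : Int) - (n : Int) = ((i - n : Nat) : Int) := by omega
      have h3 : min (n + 1) i = min n i + 1 := by omega
      have h4 : min n i = n := by omega
      simp [h2, h3, h4, Finset.sum_range_succ, List.getD]
      exact fun h' => absurd h' (by omega)
    · have h1 : ¬ (i : Int) > (n : Int) := by exact_mod_cast h
      have h3 : min (n + 1) i = min n i := by omega
      simp [h3]
      exact fun h' => absurd h' h

lemma innerA (state : List Int) (k : Int) (i : Int) (hi : 0 ≤ i) :
    (PySem.List.pyRange 0 k 1).foldl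
      (fun s j => if i > j then s + ((PySem.List.pyGet? state (i - j)).getD 0) else s) 0
    = pvW state k.toNat i.toNat := by
  obtain ⟨n, rfl⟩ := Int.eq_ofNat_of_zero_le hi
  rw [PySem.List.pyRange_one]
  simp only [List.foldl_map, zero_add, Int.sub_zero, Int.toNat_natCast]
  rw [pvW]
  exact innerA_aux state n k.toNat

lemma pvW_succ (state : List Int) (kt t : Nat) :
    pvW state kt (t + 1) =
      pvW state kt t + state.getD (t + 1) 0 -
        (if 1 ≤ ((t : Int) + 1) - (kt : Int) then state.getD (t + 1 - kt) 0 else 0) := by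
  by_cases hk : kt ≤ t
  · have hc : 1 ≤ ((t : Int) + 1) - (kt : Int) := by omega
    rcases Nat.eq_zero_or_eq_succ_pred kt with h0 | hs
    · subst h0; simp [pvW]
    · set c := kt - 1 with hc'
      have hkt : kt = c + 1 := hs
      have hm1 : min kt (t + 1) = c + 1 := by omega
      have hm2 : min kt t = c + 1 := by omega
      have hsub : t + 1 - kt = t - c := by omega
      rw [pvW, pvW, hm1, hm2, Finset.sum_range_succ', Finset.sum_range_succ]
      simp only [Nat.succ_sub_succ_eq_sub, Nat.sub_zero, if_pos hc, hsub]
      ring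
  · have hc : ¬ 1 ≤ ((t : Int) + 1) - (kt : Int) := by omega
    have hm1 : min kt (t + 1) = t + 1 := by omega
    have hm2 : min kt t = t := by omega
    rw [pvW, pvW, hm1, hm2, Finset.sum_range_succ']
    simp only [Nat.succ_sub_succ_eq_sub, Nat.sub_zero, if_neg hc]
    ring

lemma pvMain (state : List Int) (k m r : Int) : ∀ N : Nat,
    (PySem.List.pyRange 0 (N : Int) 1).foldl
      (fun (cs : Int × Int) i =>
        (if PySem.Int.mod
              (if 1 ≤ i then
                cs.2 + (PySem.List.pyGet? state i).getD 0 -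
                  (if 1 ≤ i - ((k.toNat : Nat) : Int) then (PySem.List.pyGet? state (i - ((k.toNat : Nat) : Int))).getD 0 else 0)
              else cs.2) m = r then cs.1 + 1 else cs.1,
         if 1 ≤ i then
            cs.2 + (PySem.List.pyGet? state i).getD 0 -
              (if 1 ≤ i - ((k.toNat : Nat) : Int) then (PySem.List.pyGet? state (i - ((k.toNat : Nat) : Int))).getD 0 else 0)
          else cs.2)) ((0 : Int), (0 : Int))
    = ((PySem.List.pyRange 0 (N : Int) 1).foldl
        (fun fitness_cnt i =>
          if PySem.Int.mod
              ((PySem.List.pyRange 0 k 1).foldl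
                (fun sum j =>
                  if i > j then sum + ((PySem.List.pyGet? state (i - j)).getD 0) else sum) 0) m = r
          then fitness_cnt + 1 else fitness_cnt) 0,
       pvW state k.toNat (N - 1)) := by
  intro N
  induction N with
  | zero =>
    rw [PySem.List.pyRange_one_eq_nil (a := 0) (b := ((0 : Nat) : Int)) (by omega)]
    simp [pvW_zero]
  | succ N ih =>
    have hcast : ((N + 1 : Nat) : Int) = (N : Int) + 1 := by push_cast; ring
    rw [hcast, PySem.List.pyRange_one_succ_right (by positivity), List.foldl_append,
        List.foldl_append, ih]
    simp only [List.foldl_cons, List.foldl_nil]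
    -- the running sum after step N equals pvW … N
    have hs :
        (if 1 ≤ (N : Int) then
            pvW state k.toNat (N - 1) + (PySem.List.pyGet? state (N : Int)).getD 0 -
              (if 1 ≤ (N : Int) - ((k.toNat : Nat) : Int) then
                (PySem.List.pyGet? state ((N : Int) - ((k.toNat : Nat) : Int))).getD 0 else 0)
          else pvW state k.toNat (N - 1)) = pvW state k.toNat N := by
      match N with
      | 0 => simp
      | (t + 1) =>
        have h1 : (1 : Int) ≤ ((t + 1 : Nat) : Int) := by push_cast; omega
        rw [if_pos h1]
        have hget : (PySem.List.pyGet? state ((t + 1 : Nat) : Int)).getD 0 = state.getD (t + 1) 0 := by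
          rw [PySem.List.pyGet?_natCast]; rfl
        rw [hget, Nat.add_sub_cancel, pvW_succ]
        by_cases hc : 1 ≤ ((t : Int) + 1) - (k.toNat : Int)
        · have hc' : (1 : Int) ≤ ((t + 1 : Nat) : Int) - (k.toNat : Int) := by push_cast; push_cast at hc; omega
          have hidx : ((t + 1 : Nat) : Int) - (k.toNat : Int) = ((t + 1 - k.toNat : Nat) : Int) := by
            push_cast at hc' ⊢; omega
          rw [if_pos hc', if_pos hc, hidx, PySem.List.pyGet?_natCast]; rfl
        · have hc' : ¬ (1 : Int) ≤ ((t + 1 : Nat) : Int) - (k.toNat : Int) := by push_cast; push_cast at hc; omega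
          rw [if_neg hc', if_neg hc]
    rw [hs]
    have hinner := innerA state k (N : Int) (by positivity)
    rw [hinner, Int.toNat_natCast, Nat.add_sub_cancel]

-- (if k > 0 then k else 0) = ↑k.toNat
lemma pvKK (k : Int) : (if k > 0 then k else 0) = ((k.toNat : Nat) : Int) := by
  by_cases h : k ≤ 0
  · rw [if_neg (by omega), Int.toNat_of_nonpos h]; rfl
  · rw [if_pos (by omega)]
    exact (Int.toNat_of_nonneg (by omega)).symm

-- ===== VERDICT (by name: the statement is the Claim_ definition above) =====
theorem prob3_max_spec : Claim_equal_prob3_max := by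
  intro state k m r _ _
  simp only [Spec_prob3_max, prob3_max, prob3_max_alt, PySem.List.len_eq]
  rw [pvKK]
  by_cases hlen : state.length = 0
  · rw [hlen]
    rw [show (((0 : Nat) : Int) - 1) = (-1 : Int) by norm_num,
        PySem.List.pyRange_one_eq_nil (a := 0) (b := -1) (by omega)]
    simp
  · obtain ⟨L, hL⟩ : ∃ L : Nat, ((state.length : Int) - 1) = (L : Int) :=
      ⟨state.length - 1, by omega⟩
    rw [hL, pvMain state k m r L]
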